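-- pv_equiv track=rewrite | github.com/wu-uk/AutoYara | src/autoyara/collectors/analysis.py | _find_seq_best_in_lines
-- ===== SOURCE A (Python) =====
-- def _lines_equal_seq(chunk, new_seq):
--     if len(chunk) != len(new_seq):
--         return False
--     for a, b in zip(chunk, new_seq, strict=False):
--         if a.rstrip("\r") != b.rstrip("\r"):
--             return False
--     return True
--
-- def _find_seq_best_in_lines(
--     lines: list[str], seq: list[str], near: int | None = None
-- ) -> int | None:
--     """在全文件中找与 seq 匹配的起始行；若给定 near（0-based 行索引），优先选距离最近的一处。"""
--     if not seq:
--         return None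
--     hi = len(lines) - len(seq)
--     if hi < 0:
--         return None
--     best_idx: int | None = None
--     best_dist = 10**9
--     for i in range(0, hi + 1):
--         chunk = lines[i : i + len(seq)]
--         if _lines_equal_seq(chunk, seq) or _lines_equal_seq(
--             [x.rstrip() for x in chunk], [x.rstrip() for x in seq]
--         ):
--             if near is None:
--                 return i
--             d = abs(i - near)
--             if d < best_dist:
--                 best_dist = d
--                 best_idx = i
--     return best_idx
-- ===== SOURCE B (Python) =====
-- def _window_eq(L, i, S):
--     for j, s in enumerate(S):
--         if L[i + j] != s:
--             return False
--     return True
--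
-- def _find_seq_best_in_lines(lines, seq, near=None):
--     """Index-based matching: build a dict from normalized line -> positions (once,
--     per normalization mode), so only candidate start positions whose first line
--     matches are verified -- no scan over all start positions."""
--     if not seq:
--         return None
--     m = len(seq)
--     hi = len(lines) - m
--     if hi < 0:
--         return None
--     L1 = [x.rstrip("\r") for x in lines]
--     L2 = [x.rstrip() for x in lines]
--     S1 = [x.rstrip("\r") for x in seq]
--     S2 = [x.rstrip() for x in seq]
--     index1 = {}
--     for i, v in enumerate(L1):
--         index1.setdefault(v, []).append(i)
--     index2 = {}
--     for i, v in enumerate(L2):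
--         index2.setdefault(v, []).append(i)
--     cand = sorted(set(index1.get(S1[0], []) + index2.get(S2[0], [])))
--     matches = [i for i in cand
--                if i <= hi and (_window_eq(L1, i, S1) or _window_eq(L2, i, S2))]
--     if not matches:
--         return None
--     if near is None:
--         return matches[0]
--     return min(matches, key=lambda i: abs(i - near))
-- ===== Notes on version B (the rewrite author's own statement) =====
-- stated objective: alternative
-- what changed: B replaces A's scan over every start position (renormalizing each window in a best/best_dist loop) by a hash index built once per normalization mode (normalized line -> list of positions): only candidate positions whose first normalized line matches are verified, then the answer is selected (first match, or min by distance to near); A's 10**9 best-dist sentinel is dropped.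
-- intended difference: When near is given, a match exists, but every matching position is at distance >= 10**9 from near, A's sentinel best_dist=10**9 makes it return None although matches exist; B returns the nearest match, which is the intended 'prefer the nearest' behaviour. — e.g. on _find_seq_best_in_lines(["a"], ["a"], some 1000000000): A returns none, B returns some 0
import Mathlib
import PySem

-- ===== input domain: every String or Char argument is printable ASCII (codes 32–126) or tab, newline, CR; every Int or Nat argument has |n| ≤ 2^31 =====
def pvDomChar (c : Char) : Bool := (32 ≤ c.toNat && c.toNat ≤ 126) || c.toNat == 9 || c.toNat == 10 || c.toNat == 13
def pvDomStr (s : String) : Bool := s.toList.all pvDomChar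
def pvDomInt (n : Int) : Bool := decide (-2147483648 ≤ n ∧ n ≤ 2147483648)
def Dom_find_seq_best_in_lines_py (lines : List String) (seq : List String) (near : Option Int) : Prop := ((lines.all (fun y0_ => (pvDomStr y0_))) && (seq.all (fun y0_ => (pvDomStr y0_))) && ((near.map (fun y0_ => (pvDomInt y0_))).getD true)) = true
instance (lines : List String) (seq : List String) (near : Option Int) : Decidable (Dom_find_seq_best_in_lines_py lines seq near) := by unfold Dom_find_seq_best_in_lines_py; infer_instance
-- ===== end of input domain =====

-- B replaces A's scan over every start position by a hash index built once per normalization mode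
-- (normalized line -> positions); only candidate positions whose first line matches are verified
-- (objective: alternative algorithm, not claimed faster).

-- hand port of str.rstrip("\r") (PySem has no rstrip-with-chars primitive): drops exactly the
-- trailing '\r' characters; exact on all strings. Both Pythons use x.rstrip("\r").
def rstrip_cr (s : String) : String :=
  String.ofList ((s.toList.reverse.dropWhile (fun c => c == '\r')).reverse)

-- ===== PORT A =====
def lines_equal_seq_py (chunk new_seq : List String) : Bool :=
  if chunk.length ≠ new_seq.length then false
  else (chunk.zip new_seq).all (fun p => rstrip_cr p.1 == rstrip_cr p.2)

-- the loop-body test of A: chunk = lines[i:i+len(seq)]; _lines_equal_seq(chunk, seq) or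
-- _lines_equal_seq([x.rstrip() for x in chunk], [x.rstrip() for x in seq])
def find_seq_match_py (lines seq : List String) (i : Int) : Bool :=
  let chunk := PySem.List.slice lines (some i) (some (i + (seq.length : Int)))
  lines_equal_seq_py chunk seq
    || lines_equal_seq_py (chunk.map PySem.Str.rstrip) (seq.map PySem.Str.rstrip)

def find_seq_A_loop (lines seq : List String) (near : Option Int) :
    List Int → Option Int → Int → Option Int
  | [], best, _ => best
  | i :: rest, best, bd =>
    if find_seq_match_py lines seq i then
      match near with
      | none => some i
      | some v =>
        let d := |i - v|
        if d < bd then find_seq_A_loop lines seq near rest (some i) d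
        else find_seq_A_loop lines seq near rest best bd
    else find_seq_A_loop lines seq near rest best bd

def find_seq_best_in_lines_py (lines : List String) (seq : List String) (near : Option Int) : Option Int :=
  if seq.isEmpty then none
  else
    let hi : Int := (lines.length : Int) - (seq.length : Int)
    if hi < 0 then none
    else find_seq_A_loop lines seq near (PySem.List.pyRange 0 (hi + 1) 1) none (10 ^ 9)

-- ===== PORT B =====
-- 'for i, v in enumerate(L): index.setdefault(v, []).append(i)' — grouping dict, built once
def find_seq_group_index (L : List String) : PySem.Dict String (List Int) :=
  (PySem.List.enumerate L 0).foldl (fun d p => d.modify p.2 [] (fun l => l ++ [p.1])) PySem.Dict.empty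

-- 'for j, s in enumerate(S): if L[i + j] != s: return False / return True' (early exit);
-- total via pyGetD: only evaluated under the 'i <= hi' guard, where every i + j is in range
def find_seq_window_eq (L : List String) (i : Int) : List String → Int → Bool
  | [], _ => true
  | s :: rest, j =>
    (PySem.List.pyGetD L (i + j) "" == s) && find_seq_window_eq L i rest (j + 1)

def find_seq_best_in_lines_py_alt (lines : List String) (seq : List String) (near : Option Int) : Option Int :=
  if seq.isEmpty then none
  else
    let m := seq.length
    let hi : Int := (lines.length : Int) - (m : Int)
    if hi < 0 then none
    else
      let L1 := lines.map rstrip_cr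
      let L2 := lines.map PySem.Str.rstrip
      let S1 := seq.map rstrip_cr
      let S2 := seq.map PySem.Str.rstrip
      let index1 := find_seq_group_index L1
      let index2 := find_seq_group_index L2
      let cand := PySem.List.sorted
        (PySem.Set.ofList (index1.getD (PySem.List.pyGetD S1 0 "") []
                            ++ index2.getD (PySem.List.pyGetD S2 0 "") []))
        (fun x => x) false
      let hits := cand.filter (fun i =>
        decide (i ≤ hi) &&
        (find_seq_window_eq L1 i S1 0 || find_seq_window_eq L2 i S2 0))
      match hits with
      | [] => none
      | x :: _ =>
        match near with
        | none => some x
        | some v => PySem.List.min? hits (fun i => |i - v|)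

-- ===== PRECONDITION & SPEC =====
-- 'seq, normalized (either way), occurs at start line k': a property of the input, used only by D_.
def pvMatchAt (lines seq : List String) (k : Nat) : Prop :=
  seq.map rstrip_cr <+: (lines.map rstrip_cr).drop k ∨
  seq.map PySem.Str.rstrip <+: (lines.map PySem.Str.rstrip).drop k

-- When near is given, a match exists, but every matching position is at distance >= 10**9 from
-- near, A's sentinel best_dist = 10**9 makes it return None although matches exist; B returns the
-- nearest match, which is the intended 'prefer the nearest' behaviour.
def D_find_seq_best_in_lines_py (lines : List String) (seq : List String) (near : Option Int) : Prop :=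
  near ≠ none ∧ seq ≠ [] ∧ (∃ k < lines.length, pvMatchAt lines seq k) ∧
  (∀ k < lines.length, pvMatchAt lines seq k → 10 ^ 9 ≤ |(k : Int) - near.getD 0|)

instance (lines : List String) (seq : List String) (near : Option Int) : Decidable (D_find_seq_best_in_lines_py lines seq near) := by
  unfold D_find_seq_best_in_lines_py pvMatchAt; infer_instance

def Spec_find_seq_best_in_lines_py (lines : List String) (seq : List String) (near : Option Int) (out : Option Int) : Prop :=
  ¬ D_find_seq_best_in_lines_py lines seq near → out = find_seq_best_in_lines_py_alt lines seq near
instance (lines : List String) (seq : List String) (near : Option Int) (out : Option Int) : Decidable (Spec_find_seq_best_in_lines_py lines seq near out) := by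
  unfold Spec_find_seq_best_in_lines_py; infer_instance

def pvDiffWitness_find_seq_best_in_lines_py : List String × List String × Option Int :=
  (["a"], ["a"], some 1000000000)
def pvDiffWitnessOut_find_seq_best_in_lines_py : (Option Int) × (Option Int) := (none, some 0)

-- ===== CLAIM (what is proved, stated in full; the proofs are below) =====
def Claim_unchanged_find_seq_best_in_lines_py : Prop := ∀ (lines : List String) (seq : List String) (near : Option Int), Dom_find_seq_best_in_lines_py lines seq near → Spec_find_seq_best_in_lines_py lines seq near (find_seq_best_in_lines_py lines seq near)
def Claim_changed_find_seq_best_in_lines_py : Prop := Dom_find_seq_best_in_lines_py (pvDiffWitness_find_seq_best_in_lines_py.1) (pvDiffWitness_find_seq_best_in_lines_py.2.1) (pvDiffWitness_find_seq_best_in_lines_py.2.2) ∧ D_find_seq_best_in_lines_py (pvDiffWitness_find_seq_best_in_lines_py.1) (pvDiffWitness_find_seq_best_in_lines_py.2.1) (pvDiffWitness_find_seq_best_in_lines_py.2.2) ∧ find_seq_best_in_lines_py (pvDiffWitness_find_seq_best_in_lines_py.1) (pvDiffWitness_find_seq_best_in_lines_py.2.1) (pvDiffWitness_find_seq_best_in_lines_py.2.2)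 = pvDiffWitnessOut_find_seq_best_in_lines_py.1 ∧ find_seq_best_in_lines_py_alt (pvDiffWitness_find_seq_best_in_lines_py.1) (pvDiffWitness_find_seq_best_in_lines_py.2.1) (pvDiffWitness_find_seq_best_in_lines_py.2.2) = pvDiffWitnessOut_find_seq_best_in_lines_py.2 ∧ pvDiffWitnessOut_find_seq_best_in_lines_py.1 ≠ pvDiffWitnessOut_find_seq_best_in_lines_py.2
def Claim_exact_find_seq_best_in_lines_py : Prop := ∀ (lines : List String) (seq : List String) (near : Option Int), Dom_find_seq_best_in_lines_py lines seq near → D_find_seq_best_in_lines_py lines seq near → find_seq_best_in_lines_py lines seq near ≠ find_seq_best_in_lines_py_alt lines seq near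

-- ===== LEMMAS AND PROOFS =====

-- B's per-position test, named for the proofs
def pvCondB (lines seq : List String) (i : Int) : Bool :=
  (PySem.List.slice (lines.map rstrip_cr) (some i) (some (i + (seq.length : Int))) == seq.map rstrip_cr) ||
  (PySem.List.slice (lines.map PySem.Str.rstrip) (some i) (some (i + (seq.length : Int))) == seq.map PySem.Str.rstrip)

-- A's best/best_dist loop restricted to the matching indices
def pvSelA (d : Int → Int) : List Int → Option Int → Int → Option Int
  | [], b, _ => b
  | j :: ms, b, bd => if d j < bd then pvSelA d ms (some j) (d j) else pvSelA d ms b bd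

def pvStep (d : Int → Int) (acc : Option Int) (x : Int) : Option Int :=
  match acc with
  | none => some x
  | some m => if d x < d m then some x else some m

theorem dropWhile_cr_dropWhile_isspace (l : List Char) :
    List.dropWhile (fun c => c == '\r') (List.dropWhile PySem.Chars.isspace l)
      = List.dropWhile PySem.Chars.isspace l := by
  induction l with
  | nil => simp
  | cons x t ih =>
    by_cases hx : PySem.Chars.isspace x = true
    · simpa [hx] using ih
    · have hxr : (x == '\r') = false := by
        cases hcr : x == '\r'
        · rfl
        · exfalso
          have hx' : x = '\r' := by simpa using hcr
          subst hx'
          exact hx (by decide)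
      simp [hx, hxr]

theorem rstrip_cr_rstrip (s : String) : rstrip_cr (PySem.Str.rstrip s) = PySem.Str.rstrip s := by
  unfold rstrip_cr PySem.Str.rstrip PySem.Chars.rstrip
  simp [dropWhile_cr_dropWhile_isspace]

theorem zipall_eq (f : String → String) :
    ∀ (c s : List String), c.length = s.length →
      ((c.zip s).all (fun p => f p.1 == f p.2)) = (c.map f == s.map f) := by
  intro c
  induction c with
  | nil =>
    intro s h
    cases s with
    | nil => simp
    | cons b t => simp at h
  | cons a c ih =>
    intro s h
    cases s with
    | nil => simp at h
    | cons b t =>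
      have ht : c.length = t.length := by simpa using h
      simp only [List.zip_cons_cons, List.all_cons, List.map_cons]
      rw [ih t ht]
      cases h1 : f a == f b <;> cases h2 : c.map f == t.map f <;>
        simp_all [List.cons_beq_cons]

theorem cond_eq (lines seq : List String) (i : Int)
    (hi0 : 0 ≤ i) (hiu : i ≤ (lines.length : Int) - (seq.length : Int)) :
    find_seq_match_py lines seq i = pvCondB lines seq i := by
  obtain ⟨k, rfl⟩ : ∃ k : Nat, i = (k : Int) := ⟨i.toNat, (Int.toNat_of_nonneg hi0).symm⟩
  have hkm : k + seq.length ≤ lines.length := by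
    have hk : (k : Int) ≤ (lines.length : Int) - (seq.length : Int) := hiu
    omega
  have hslice : ∀ (L : List String),
      PySem.List.slice L (some (k : Int)) (some ((k : Int) + (seq.length : Int)))
        = (L.drop k).take seq.length := by
    intro L
    simpa using PySem.List.slice_natCast_add L k seq.length
  have hlen : ((lines.drop k).take seq.length).length = seq.length := by
    simp only [List.length_take, List.length_drop]
    omega
  unfold find_seq_match_py pvCondB
  simp only [hslice]
  have hmapcomm : ∀ (f : String → String),
      ((lines.map f).drop k).take seq.length = ((lines.drop k).take seq.length).map f := by
    intro f
    simp [← List.map_drop, ← List.map_take]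
  rw [hmapcomm, hmapcomm]
  set chunk := (lines.drop k).take seq.length with hchunk
  have e1 : lines_equal_seq_py chunk seq = (chunk.map rstrip_cr == seq.map rstrip_cr) := by
    unfold lines_equal_seq_py
    rw [if_neg (by omega)]
    exact zipall_eq rstrip_cr chunk seq hlen
  have e2 : lines_equal_seq_py (chunk.map PySem.Str.rstrip) (seq.map PySem.Str.rstrip)
      = (chunk.map PySem.Str.rstrip == seq.map PySem.Str.rstrip) := by
    unfold lines_equal_seq_py
    rw [if_neg (by simp [hlen])]
    rw [zipall_eq rstrip_cr _ _ (by simp [hlen])]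
    simp [List.map_map, Function.comp_def, rstrip_cr_rstrip]
  rw [e1, e2]

theorem loopA_none (lines seq : List String) :
    ∀ (is : List Int) (b : Option Int) (bd : Int),
      find_seq_A_loop lines seq none is b bd =
        (match is.filter (find_seq_match_py lines seq) with
         | [] => b
         | x :: _ => some x) := by
  intro is
  induction is with
  | nil => intro b bd; simp [find_seq_A_loop]
  | cons i rest ih =>
    intro b bd
    by_cases h : find_seq_match_py lines seq i = true
    · simp [find_seq_A_loop, h]
    · simp only [Bool.not_eq_true] at h
      simp [find_seq_A_loop, h, ih]

theorem loopA_some (lines seq : List String) (v : Int) :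
    ∀ (is : List Int) (b : Option Int) (bd : Int),
      find_seq_A_loop lines seq (some v) is b bd =
        pvSelA (fun i => |i - v|) (is.filter (find_seq_match_py lines seq)) b bd := by
  intro is
  induction is with
  | nil => intro b bd; simp [find_seq_A_loop, pvSelA]
  | cons i rest ih =>
    intro b bd
    by_cases h : find_seq_match_py lines seq i = true
    · by_cases hd : |i - v| < bd
      · simp [find_seq_A_loop, h, hd, pvSelA, ih]
      · simp [find_seq_A_loop, h, hd, pvSelA, ih]
    · simp only [Bool.not_eq_true] at h
      simp [find_seq_A_loop, h, ih]

theorem pvSelA_skip (d : Int → Int) :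
    ∀ (ms : List Int) (b : Option Int) (bd : Int), (∀ j ∈ ms, bd ≤ d j) →
      pvSelA d ms b bd = b := by
  intro ms
  induction ms with
  | nil => intro b bd _; rfl
  | cons j t ih =>
    intro b bd h
    have hj : bd ≤ d j := h j (by simp)
    unfold pvSelA
    rw [if_neg (by omega)]
    exact ih b bd (fun k hk => h k (by simp [hk]))

theorem pvSelA_foldl (d : Int → Int) :
    ∀ (ms : List Int) (c : Int), pvSelA d ms (some c) (d c) = ms.foldl (pvStep d) (some c) := by
  intro ms
  induction ms with
  | nil => intro c; rfl
  | cons y t ih =>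
    intro c
    by_cases h : d y < d c
    · simp only [pvSelA, List.foldl_cons, pvStep, if_pos h]
      exact ih y
    · simp only [pvSelA, List.foldl_cons, pvStep, if_neg h]
      exact ih c

theorem foldl_step_congr (d : Int → Int) :
    ∀ (r : List Int) (j x : Int), d j ≤ d x → (∃ k ∈ r, d k < d j) →
      r.foldl (pvStep d) (some j) = r.foldl (pvStep d) (some x) := by
  intro r
  induction r with
  | nil => intro j x _ h; simp at h
  | cons y t ih =>
    intro j x hjx hex
    obtain ⟨k, hk, hkd⟩ := hex
    simp only [List.foldl_cons, pvStep]
    by_cases hyj : d y < d j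
    · rw [if_pos hyj, if_pos (by omega)]
    · have hkt : k ∈ t := by
        rcases List.mem_cons.mp hk with hk | hk
        · exfalso; subst hk; omega
        · exact hk
      rw [if_neg hyj]
      by_cases hyx : d y < d x
      · rw [if_pos hyx]
        exact ih j y (by omega) ⟨k, hkt, hkd⟩
      · rw [if_neg hyx]
        exact ih j x hjx ⟨k, hkt, hkd⟩

theorem min?_eq_foldl (d : Int → Int) (ms : List Int) :
    PySem.List.min? ms d = ms.foldl (pvStep d) none := by
  unfold PySem.List.min?
  congr 1
  funext acc x
  cases acc with
  | none => rfl
  | some m => simp [pvStep]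

theorem pvSelA_eq_min? (d : Int → Int) :
    ∀ (ms : List Int) (b : Option Int) (bd : Int), (∃ j ∈ ms, d j < bd) →
      pvSelA d ms b bd = PySem.List.min? ms d := by
  intro ms
  induction ms with
  | nil => intro b bd h; simp at h
  | cons j t ih =>
    intro b bd hex
    obtain ⟨k, hk, hkd⟩ := hex
    rw [min?_eq_foldl]
    simp only [List.foldl_cons, pvStep]
    by_cases hj : d j < bd
    · unfold pvSelA
      rw [if_pos hj]
      exact pvSelA_foldl d t j
    · have hkt : k ∈ t := by
        rcases List.mem_cons.mp hk with hk | hk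
        · exfalso; subst hk; omega
        · exact hk
      unfold pvSelA
      rw [if_neg hj]
      rw [ih b bd ⟨k, hkt, hkd⟩, min?_eq_foldl]
      cases t with
      | nil => simp at hkt
      | cons y r =>
        simp only [List.foldl_cons, pvStep]
        rcases List.mem_cons.mp hkt with hky | hkr
        · subst hky
          by_cases hyj : d k < d j
          · rw [if_pos hyj]
          · omega
        · by_cases hyj : d y < d j
          · rw [if_pos hyj]
          · rw [if_neg hyj]
            exact (foldl_step_congr d r j y (by omega) ⟨k, hkr, by omega⟩).symm

theorem matchAt_le (lines seq : List String) (k : Nat) (hm1 : 0 < seq.length)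
    (h : pvMatchAt lines seq k) : k + seq.length ≤ lines.length := by
  rcases h with h | h <;>
  · have hl := h.length_le
    simp only [List.length_map, List.length_drop] at hl
    omega

theorem condB_iff_matchAt (lines seq : List String) (k : Nat) :
    pvCondB lines seq (k : Int) = true ↔ pvMatchAt lines seq k := by
  have hslice : ∀ (L : List String),
      PySem.List.slice L (some (k : Int)) (some ((k : Int) + (seq.length : Int)))
        = (L.drop k).take seq.length := by
    intro L
    simpa using PySem.List.slice_natCast_add L k seq.length
  have hpf : ∀ (f : String → String),
      (((lines.map f).drop k).take seq.length = seq.map f) ↔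
        seq.map f <+: (lines.map f).drop k := by
    intro f
    rw [List.prefix_iff_eq_take, List.length_map]
    exact eq_comm
  unfold pvCondB pvMatchAt
  simp only [hslice, Bool.or_eq_true, beq_iff_eq]
  rw [hpf rstrip_cr, hpf PySem.Str.rstrip]

-- the grouping dict's lookup: exactly the positions j (in order) with L[j] = v
theorem group_index_getD (L : List String) (v : String) :
    (find_seq_group_index L).getD v []
      = ((PySem.List.enumerate L 0).filter (fun p => p.2 == v)).map (·.1) := by
  unfold find_seq_group_index
  have hswap : (PySem.List.enumerate L 0).foldl
      (fun d p => d.modify p.2 [] (fun l => l ++ [p.1])) PySem.Dict.empty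
      = ((PySem.List.enumerate L 0).map (fun p => (p.2, p.1))).foldl
      (fun d q => d.modify q.1 [] (fun l => l ++ [q.2])) PySem.Dict.empty := by
    rw [List.foldl_map]
  rw [hswap, PySem.Dict.getD_foldl_modify_append]
  simp [List.filter_map, Function.comp_def, List.map_map]

theorem mem_group_index (L : List String) (v : String) (j : Int) :
    j ∈ (find_seq_group_index L).getD v []
      ↔ ∃ k : Nat, ∃ h : k < L.length, j = (k : Int) ∧ L[k] = v := by
  rw [group_index_getD]
  simp only [List.mem_map, List.mem_filter, PySem.List.mem_enumerate_iff]
  constructor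
  · rintro ⟨p, ⟨⟨k, hk, rfl⟩, hv⟩, rfl⟩
    exact ⟨k, hk, by simp, by simpa using hv⟩
  · rintro ⟨k, hk, rfl, hv⟩
    refine ⟨((0 : Int) + (k : Int), L[k]), ⟨⟨k, hk, rfl⟩, by simpa using hv⟩, by simp⟩

-- membership in B's candidate list
theorem mem_cand (lines seq : List String) (s0 : String) (rest : List String)
    (hseq : seq = s0 :: rest) (i : Int) :
    i ∈ PySem.List.sorted
        (PySem.Set.ofList ((find_seq_group_index (lines.map rstrip_cr)).getD
            (PySem.List.pyGetD (seq.map rstrip_cr) 0 "") []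
          ++ (find_seq_group_index (lines.map PySem.Str.rstrip)).getD
            (PySem.List.pyGetD (seq.map PySem.Str.rstrip) 0 "") []))
        (fun x => x) false
      ↔ (∃ k : Nat, ∃ h : k < lines.length,
          i = (k : Int) ∧ ((lines.map rstrip_cr)[k]'(by simpa using h) = rstrip_cr s0
            ∨ (lines.map PySem.Str.rstrip)[k]'(by simpa using h) = PySem.Str.rstrip s0)) := by
  subst hseq
  rw [PySem.List.mem_sorted]
  have hmem : ∀ x, x ∈ PySem.Set.ofList ((find_seq_group_index (lines.map rstrip_cr)).getD
      (PySem.List.pyGetD ((s0 :: rest).map rstrip_cr) 0 "") []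
      ++ (find_seq_group_index (lines.map PySem.Str.rstrip)).getD
      (PySem.List.pyGetD ((s0 :: rest).map PySem.Str.rstrip) 0 "") [])
      ↔ x ∈ (find_seq_group_index (lines.map rstrip_cr)).getD
      (PySem.List.pyGetD ((s0 :: rest).map rstrip_cr) 0 "") []
      ++ (find_seq_group_index (lines.map PySem.Str.rstrip)).getD
      (PySem.List.pyGetD ((s0 :: rest).map PySem.Str.rstrip) 0 "") [] := by
    intro x
    rw [← PySem.List.dedup_eq_ofList, PySem.List.mem_dedup]
  rw [hmem, List.mem_append]
  have hget1 : PySem.List.pyGetD ((s0 :: rest).map rstrip_cr) 0 "" = rstrip_cr s0 := by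
    simp [PySem.List.pyGetD, PySem.List.pyGet?, PySem.List.pyIdx?]
  have hget2 : PySem.List.pyGetD ((s0 :: rest).map PySem.Str.rstrip) 0 "" = PySem.Str.rstrip s0 := by
    simp [PySem.List.pyGetD, PySem.List.pyGet?, PySem.List.pyIdx?]
  rw [hget1, hget2, mem_group_index, mem_group_index]
  constructor
  · rintro (⟨k, hk, rfl, hv⟩ | ⟨k, hk, rfl, hv⟩)
    · exact ⟨k, by simpa using hk, rfl, Or.inl hv⟩
    · exact ⟨k, by simpa using hk, rfl, Or.inr hv⟩
  · rintro ⟨k, hk, rfl, hv | hv⟩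
    · exact Or.inl ⟨k, by simpa using hk, rfl, hv⟩
    · exact Or.inr ⟨k, by simpa using hk, rfl, hv⟩

-- a window match forces the position inside [0, hi]
theorem condB_pos_le (lines seq : List String) (k : Nat) (hm1 : 0 < seq.length)
    (h : pvCondB lines seq (k : Int) = true) :
    (k : Int) ≤ (lines.length : Int) - (seq.length : Int) := by
  have := matchAt_le lines seq k hm1 ((condB_iff_matchAt lines seq k).mp h)
  omega

-- a window match implies the first normalized line matches, i.e. the position is a candidate
theorem matchAt_head (lines : List String) (s0 : String) (rest : List String) (k : Nat)
    (hk : k < lines.length) (h : pvMatchAt lines (s0 :: rest) k) :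
    (lines.map rstrip_cr)[k]'(by simpa using hk) = rstrip_cr s0
      ∨ (lines.map PySem.Str.rstrip)[k]'(by simpa using hk) = PySem.Str.rstrip s0 := by
  rcases h with h | h
  · left
    have h0 := h.getElem (i := 0) (by simp)
    rw [List.getElem_drop (xs := lines.map rstrip_cr) (i := k) (j := 0)] at h0
    simpa using h0.symm
  · right
    have h0 := h.getElem (i := 0) (by simp)
    rw [List.getElem_drop (xs := lines.map PySem.Str.rstrip) (i := k) (j := 0)] at h0
    simpa using h0.symm

-- the early-exit window loop equals the slice comparison when the window is in range
theorem window_eq_slice (L : List String) (k : Nat) :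
    ∀ (S : List String) (j : Nat), k + j + S.length ≤ L.length →
      find_seq_window_eq L (k : Int) S (j : Int)
        = ((L.drop (k + j)).take S.length == S) := by
  intro S
  induction S with
  | nil => intro j h; simp [find_seq_window_eq]
  | cons s rest ih =>
    intro j h
    have hkj : k + j < L.length := by simp at h; omega
    have hdrop : L.drop (k + j) = L[k + j] :: L.drop (k + j + 1) :=
      List.drop_eq_getElem_cons hkj
    have hget : PySem.List.pyGetD L ((k : Int) + (j : Int)) "" = L[k + j] := by
      rw [show (k : Int) + (j : Int) = ((k + j : Nat) : Int) from by push_cast; ring,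
        PySem.List.pyGetD_natCast]
      exact List.getD_eq_getElem L "" hkj
    have hrec := ih (j + 1) (by simp at h ⊢; omega)
    unfold find_seq_window_eq
    rw [hget, show ((j : Int) + 1) = ((j + 1 : Nat) : Int) from by push_cast; ring,
      hrec, hdrop]
    rw [show k + (j + 1) = k + j + 1 from by omega]
    rfl

-- on candidate positions (0 <= i < len lines) B's guarded early-exit test equals pvCondB
theorem filter_windowEq_eq (lines seq : List String) (cand : List Int)
    (hc : ∀ i ∈ cand, ∃ k : Nat, i = (k : Int) ∧ k < lines.length) :
    cand.filter (fun i =>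
        decide (i ≤ (lines.length : Int) - (seq.length : Int)) &&
        (find_seq_window_eq (lines.map rstrip_cr) i (seq.map rstrip_cr) 0
          || find_seq_window_eq (lines.map PySem.Str.rstrip) i (seq.map PySem.Str.rstrip) 0))
      = cand.filter (pvCondB lines seq) := by
  apply List.filter_congr
  intro i hi
  obtain ⟨k, rfl, hk⟩ := hc i hi
  by_cases hle : (k : Int) ≤ (lines.length : Int) - (seq.length : Int)
  · have hkm : k + 0 + (seq.map rstrip_cr).length ≤ (lines.map rstrip_cr).length := by
      simp; omega
    have hkm2 : k + 0 + (seq.map PySem.Str.rstrip).length ≤ (lines.map PySem.Str.rstrip).length := by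
      simp; omega
    have h1 := window_eq_slice (lines.map rstrip_cr) k (seq.map rstrip_cr) 0 hkm
    have h2 := window_eq_slice (lines.map PySem.Str.rstrip) k (seq.map PySem.Str.rstrip) 0 hkm2
    simp only [Nat.cast_zero] at h1 h2
    have hslice : ∀ (M : List String),
        PySem.List.slice M (some (k : Int)) (some ((k : Int) + (seq.length : Int)))
          = (M.drop k).take seq.length := by
      intro M
      simpa using PySem.List.slice_natCast_add M k seq.length
    unfold pvCondB
    rw [hslice, hslice, decide_eq_true hle, Bool.true_and, h1, h2]
    simp
  · rw [decide_eq_false hle, Bool.false_and]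
    by_cases hs : seq.length = 0
    · omega
    · cases hcb : pvCondB lines seq (k : Int)
      · rfl
      · exfalso
        have := condB_pos_le lines seq k (by omega) hcb
        omega

-- B's filtered candidate list equals A's filtered range: both strictly increasing with the same members
theorem cand_filter_eq (lines seq : List String) (s0 : String) (rest : List String)
    (hseq : seq = s0 :: rest) (h2 : 0 ≤ (lines.length : Int) - (seq.length : Int)) :
    (PySem.List.sorted
        (PySem.Set.ofList ((find_seq_group_index (lines.map rstrip_cr)).getD
            (PySem.List.pyGetD (seq.map rstrip_cr) 0 "") []
          ++ (find_seq_group_index (lines.map PySem.Str.rstrip)).getD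
            (PySem.List.pyGetD (seq.map PySem.Str.rstrip) 0 "") []))
        (fun x => x) false).filter (pvCondB lines seq)
      = (PySem.List.pyRange 0 ((lines.length : Int) - (seq.length : Int) + 1) 1).filter
          (pvCondB lines seq) := by
  have hm1 : 0 < seq.length := by subst hseq; simp
  apply List.Pairwise.eq_of_mem_iff (r := (· < ·))
  · exact List.Pairwise.filter _ (PySem.List.sorted_ofList_pairwise_lt _)
  · exact List.Pairwise.filter _ (PySem.List.pairwise_lt_pyRange_one 0 _)
  · intro i
    simp only [List.mem_filter, PySem.List.mem_pyRange_one, mem_cand lines seq s0 rest hseq]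
    constructor
    · rintro ⟨⟨k, hk, rfl, _⟩, hc⟩
      exact ⟨⟨by positivity, by have := condB_pos_le lines seq k hm1 hc; omega⟩, hc⟩
    · rintro ⟨⟨hi0, hiu⟩, hc⟩
      obtain ⟨k, rfl⟩ : ∃ k : Nat, i = (k : Int) := ⟨i.toNat, (Int.toNat_of_nonneg hi0).symm⟩
      have hM : pvMatchAt lines seq k := (condB_iff_matchAt lines seq k).mp hc
      have hkle := matchAt_le lines seq k hm1 hM
      have hklt : k < lines.length := by omega
      subst hseq
      exact ⟨⟨k, hklt, rfl, matchAt_head lines s0 rest k hklt hM⟩, hc⟩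

-- the two ports after peeling the two leading guards
theorem a_eq (lines seq : List String) (near : Option Int) (h1 : seq ≠ [])
    (h2 : 0 ≤ (lines.length : Int) - (seq.length : Int)) :
    find_seq_best_in_lines_py lines seq near =
      find_seq_A_loop lines seq near
        (PySem.List.pyRange 0 ((lines.length : Int) - (seq.length : Int) + 1) 1) none (10 ^ 9) := by
  unfold find_seq_best_in_lines_py
  rw [if_neg (by simpa using h1), if_neg (by omega)]

theorem alt_eq (lines seq : List String) (near : Option Int) (h1 : seq ≠ [])
    (h2 : 0 ≤ (lines.length : Int) - (seq.length : Int)) :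
    find_seq_best_in_lines_py_alt lines seq near =
      (match (PySem.List.pyRange 0 ((lines.length : Int) - (seq.length : Int) + 1) 1).filter
          (pvCondB lines seq) with
       | [] => none
       | x :: _ =>
         match near with
         | none => some x
         | some v =>
           PySem.List.min?
             ((PySem.List.pyRange 0 ((lines.length : Int) - (seq.length : Int) + 1) 1).filter
               (pvCondB lines seq)) (fun i => |i - v|)) := by
  obtain ⟨s0, rest, rfl⟩ : ∃ s0 rest, seq = s0 :: rest := by
    cases seq with
    | nil => exact absurd rfl h1
    | cons a b => exact ⟨a, b, rfl⟩
  have hge : ¬ ((lines.length : Int) - (((s0 :: rest : List String).length : Int)) < 0) := by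
    simpa using h2
  simp only [find_seq_best_in_lines_py_alt, List.isEmpty_cons, Bool.false_eq_true, if_false,
    if_neg hge]
  rw [filter_windowEq_eq lines (s0 :: rest) _ (fun i hi => by
        obtain ⟨k, hk, rfl, -⟩ := (mem_cand lines (s0 :: rest) s0 rest rfl i).mp hi
        exact ⟨k, rfl, hk⟩),
    cand_filter_eq lines (s0 :: rest) s0 rest rfl h2]

theorem filter_cond_eq (lines seq : List String) (_h2 : 0 ≤ (lines.length : Int) - (seq.length : Int)) :
    (PySem.List.pyRange 0 ((lines.length : Int) - (seq.length : Int) + 1) 1).filter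
        (find_seq_match_py lines seq)
      = (PySem.List.pyRange 0 ((lines.length : Int) - (seq.length : Int) + 1) 1).filter
        (pvCondB lines seq) := by
  apply List.filter_congr
  intro i hi
  rw [PySem.List.mem_pyRange_one] at hi
  exact cond_eq lines seq i hi.1 (by omega)

theorem degenerate_eq (lines seq : List String) (near : Option Int)
    (h : seq = [] ∨ (lines.length : Int) - (seq.length : Int) < 0) :
    find_seq_best_in_lines_py lines seq near = none ∧
      find_seq_best_in_lines_py_alt lines seq near = none := by
  rcases h with h | h
  · subst h
    constructor
    · simp [find_seq_best_in_lines_py]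
    · simp [find_seq_best_in_lines_py_alt]
  · constructor
    · unfold find_seq_best_in_lines_py
      split
      · rfl
      · rw [if_pos h]
    · unfold find_seq_best_in_lines_py_alt
      split
      · rfl
      · rw [if_pos h]

-- ===== VERDICT (by name: the statement is the Claim_ definition above) =====
theorem find_seq_best_in_lines_py_spec : Claim_unchanged_find_seq_best_in_lines_py := by
  intro lines seq near _ hND
  by_cases h1 : seq = []
  · obtain ⟨ha, hb⟩ := degenerate_eq lines seq near (Or.inl h1); rw [ha, hb]
  by_cases h2 : (lines.length : Int) - (seq.length : Int) < 0
  · obtain ⟨ha, hb⟩ := degenerate_eq lines seq near (Or.inr h2); rw [ha, hb]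
  push_neg at h2
  rw [a_eq lines seq near h1 h2, alt_eq lines seq near h1 h2]
  cases near with
  | none =>
    rw [loopA_none, filter_cond_eq lines seq h2]
  | some v =>
    rw [loopA_some, filter_cond_eq lines seq h2]
    cases hm : (PySem.List.pyRange 0 ((lines.length : Int) - (seq.length : Int) + 1) 1).filter
        (pvCondB lines seq) with
    | nil => rfl
    | cons x t =>
      have hx : x ∈ (PySem.List.pyRange 0 ((lines.length : Int) - (seq.length : Int) + 1) 1).filter
          (pvCondB lines seq) := by rw [hm]; simp
      rw [List.mem_filter] at hx
      have hxb := PySem.List.mem_pyRange_one.mp hx.1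
      have hm1 : 0 < seq.length := List.length_pos_iff.mpr h1
      have hxe : x = ((x.toNat : Nat) : Int) := (Int.toNat_of_nonneg hxb.1).symm
      have hmx : pvMatchAt lines seq x.toNat := by
        rw [← condB_iff_matchAt, ← hxe]
        exact hx.2
      have hex : ∃ k, k < lines.length ∧ pvMatchAt lines seq k ∧ |(k : Int) - v| < 10 ^ 9 := by
        by_contra hall
        push_neg at hall
        refine hND ⟨by simp, h1, ⟨x.toNat, by omega, hmx⟩, ?_⟩
        intro k hk hkM
        simpa using hall k hk hkM
      obtain ⟨k, hkn, hkM, hkd⟩ := hex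
      have hkle := matchAt_le lines seq k hm1 hkM
      have hif : (k : Int) ∈ (x :: t : List Int) := by
        rw [← hm, List.mem_filter]
        refine ⟨PySem.List.mem_pyRange_one.mpr ⟨by omega, by omega⟩, ?_⟩
        exact (condB_iff_matchAt lines seq k).mpr hkM
      exact pvSelA_eq_min? (fun i => |i - v|) (x :: t) none (10 ^ 9) ⟨(k : Int), hif, hkd⟩

theorem find_seq_best_in_lines_py_changed : Claim_changed_find_seq_best_in_lines_py := by
  unfold Claim_changed_find_seq_best_in_lines_py; decide

theorem find_seq_best_in_lines_py_tight : Claim_exact_find_seq_best_in_lines_py := by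
  intro lines seq near _ hD
  obtain ⟨hnn, h1, ⟨k, hkn, hkM⟩, hfar⟩ := hD
  cases near with
  | none => exact absurd rfl hnn
  | some v =>
    have hm1 : 0 < seq.length := List.length_pos_iff.mpr h1
    have hkle := matchAt_le lines seq k hm1 hkM
    have h2 : 0 ≤ (lines.length : Int) - (seq.length : Int) := by omega
    rw [a_eq lines seq (some v) h1 h2, alt_eq lines seq (some v) h1 h2]
    rw [loopA_some, filter_cond_eq lines seq h2]
    have hif : (k : Int) ∈ (PySem.List.pyRange 0 ((lines.length : Int) - (seq.length : Int) + 1) 1).filter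
        (pvCondB lines seq) := by
      rw [List.mem_filter]
      exact ⟨PySem.List.mem_pyRange_one.mpr ⟨by omega, by omega⟩,
        (condB_iff_matchAt lines seq k).mpr hkM⟩
    cases hm : (PySem.List.pyRange 0 ((lines.length : Int) - (seq.length : Int) + 1) 1).filter
        (pvCondB lines seq) with
    | nil => rw [hm] at hif; simp at hif
    | cons x t =>
      rw [pvSelA_skip]
      · intro heq
        have hnil : (x :: t : List Int) = [] := by
          rw [← PySem.List.min?_eq_none_iff (xs := x :: t) (key := fun i => |i - v|)]
          exact heq.symm
        simp at hnil
      · intro j hj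
        rw [← hm, List.mem_filter] at hj
        have hjb := PySem.List.mem_pyRange_one.mp hj.1
        have hje : j = ((j.toNat : Nat) : Int) := (Int.toNat_of_nonneg hjb.1).symm
        have hjM : pvMatchAt lines seq j.toNat := by
          rw [← condB_iff_matchAt, ← hje]
          exact hj.2
        have := hfar j.toNat (by omega) hjM
        rw [Option.getD_some] at this
        rw [← hje] at this
        simpa using this
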